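-- pv_equiv track=rewrite | github.com/cheol-95/Algorithm | Python/015. 더 맵게/More Hot.py | solution
-- ===== SOURCE A (Python) =====
-- import heapq
--
-- def solution(scoville, k):
--     answer = 0
--     heapq.heapify(scoville)
--
--     while scoville[0] < k:
--         try:
--             heapq.heappush(scoville, heapq.heappop(scoville) + 2*heapq.heappop(scoville))
--         except IndexError:
--             return -1
--         answer += 1
--
--     return answer
-- ===== SOURCE B (Python) =====
-- def solution(scoville, k):
--     pool = list(scoville)
--     answer = 0
--     while min(pool) < k:
--         if len(pool) < 2:
--             return -1
--         # one linear scan finds the two smallest values; no order is ever maintained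
--         a, b = pool[0], pool[1]
--         if a <= b:
--             m1, m2 = a, b
--         else:
--             m1, m2 = b, a
--         for v in pool[2:]:
--             if v < m1:
--                 m2 = m1
--                 m1 = v
--             elif v < m2:
--                 m2 = v
--         pool.remove(m1)
--         pool.remove(m2)
--         pool.append(m1 + 2 * m2)
--         answer += 1
--     return answer
-- ===== Notes on version B (the rewrite author's own statement) =====
-- stated objective: alternative
-- what changed: Eliminates the priority queue entirely: the pool is kept completely unordered and each round one linear tournament scan finds the two smallest values, which are removed by value and replaced by a+2*b; no heap/sort/insertion invariant is ever built or maintained (A heapifies and sifts). A mutates its argument into a heap, B leaves it untouched (return-value equivalence).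
import Mathlib
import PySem

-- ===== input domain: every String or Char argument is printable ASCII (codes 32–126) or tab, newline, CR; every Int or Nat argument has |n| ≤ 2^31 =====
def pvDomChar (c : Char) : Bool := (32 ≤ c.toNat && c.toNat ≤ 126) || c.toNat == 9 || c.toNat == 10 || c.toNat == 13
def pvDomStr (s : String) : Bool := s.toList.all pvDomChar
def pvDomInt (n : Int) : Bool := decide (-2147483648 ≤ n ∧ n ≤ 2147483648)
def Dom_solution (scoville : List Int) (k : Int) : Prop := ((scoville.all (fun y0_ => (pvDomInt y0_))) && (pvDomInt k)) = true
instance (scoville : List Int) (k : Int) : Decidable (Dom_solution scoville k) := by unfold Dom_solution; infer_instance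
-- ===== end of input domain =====

-- B eliminates A's binary heap entirely: the pool stays unordered and each round one linear
-- tournament scan finds the two smallest values (objective: alternative).  A mutates its argument
-- into a heap, B does not; the equivalence proved here is about the RETURN value only.

-- ===== PORT A =====
-- CPython heapq._siftdown(heap, startpos, pos): 'newitem' is heap[pos] at entry and is passed
-- explicitly as x (the loop keeps it in a variable exactly like CPython does).
def sdLoop (h : List Int) (s pos : Nat) (x : Int) : List Int :=
  if _hp : s < pos then
    if x < h.getD ((pos - 1) / 2) 0 then
      sdLoop (h.set pos (h.getD ((pos - 1) / 2) 0)) s ((pos - 1) / 2) x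
    else h.set pos x
  else h.set pos x
  termination_by pos
  decreasing_by exact lt_of_le_of_lt (Nat.div_le_self _ _) (by omega)

-- CPython heapq._siftup(heap, pos): bubble the smaller child up to the leaf, then _siftdown;
-- x is the saved 'newitem' (= heap[pos] at the entry of _siftup).
-- CPython's childpos selection: the smaller child (ties go left, per 'if not heap[c] < heap[r]')
def suChild (h : List Int) (pos : Nat) : Nat :=
  if 2 * pos + 2 < h.length ∧ ¬ (h.getD (2 * pos + 1) 0 < h.getD (2 * pos + 2) 0)
  then 2 * pos + 2 else 2 * pos + 1

theorem suChild_gt (h : List Int) (pos : Nat) : pos < suChild h pos := by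
  unfold suChild; split <;> omega

theorem suChild_lt (h : List Int) (pos : Nat) (hc : 2 * pos + 1 < h.length) :
    suChild h pos < h.length := by
  unfold suChild; split <;> omega

def suLoop (h : List Int) (s pos : Nat) (x : Int) : List Int :=
  if _hc : 2 * pos + 1 < h.length then
    suLoop (h.set pos (h.getD (suChild h pos) 0)) s (suChild h pos) x
  else sdLoop (h.set pos x) s pos x
  termination_by h.length - pos
  decreasing_by
    simp only [List.length_set]
    have h1 := suChild_gt h pos
    have h2 := suChild_lt h pos _hc
    omega

def siftup (h : List Int) (pos : Nat) : List Int := suLoop h pos pos (h.getD pos 0)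

-- heapq.heappop: pop the last element; if the heap is nonempty, save heap[0], move the last
-- element to the root and sift up.  (Python raises IndexError on []; the port returns (0, [])
-- there — those inputs are outside Pre_.)
def heappop (h : List Int) : Int × List Int :=
  let lastelt := h.getD (h.length - 1) 0
  let h' := h.dropLast
  if h'.isEmpty then (lastelt, h')
  else (h'.getD 0 0, siftup (h'.set 0 lastelt) 0)

-- heapq.heappush: append, then _siftdown(heap, 0, len(heap)-1); newitem = the appended v.
def heappush (h : List Int) (v : Int) : List Int := sdLoop (h ++ [v]) 0 h.length v

-- heapq.heapify: for i in reversed(range(n//2)): _siftup(heap, i)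
def heapifyLoop : List Int → Nat → List Int
  | h, 0 => h
  | h, (i+1) => heapifyLoop (siftup h i) i

def heapify (h : List Int) : List Int := heapifyLoop h (h.length / 2)

-- the while loop of A: while scoville[0] < k: push(pop() + 2*pop()) / except IndexError: -1.
-- The fuel argument (initially the heap's length) only makes the recursion structural: each
-- iteration shrinks the heap by one element, so a nonempty heap never exhausts it.
def loopA : Nat → List Int → Int → Int → Int
  | 0, _, _, ans => ans   -- fuel exhausted: never reached from solution on a nonempty heap
  | fuel + 1, h, k, ans =>
    if h.getD 0 0 < k then
      let p1 := heappop h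
      if p1.2.isEmpty then -1
      else
        let p2 := heappop p1.2
        loopA fuel (heappush p2.2 (p1.1 + 2 * p2.1)) k (ans + 1)
    else ans

def solution (scoville : List Int) (k : Int) : Int :=
  loopA (heapify scoville).length (heapify scoville) k 0

-- ===== PORT B =====
-- the 'for v in pool[2:]' tournament scan of Source B: state (m1, m2) = two smallest seen so far
def scanTwo : List Int → Int → Int → Int × Int
  | [], m1, m2 => (m1, m2)
  | v :: r, m1, m2 =>
    if v < m1 then scanTwo r v m1
    else if v < m2 then scanTwo r m1 v
    else scanTwo r m1 m2

-- min(pool) on a nonempty list; pyMin [] = 0 is junk (only reachable outside Pre_, where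
-- Source B raises ValueError like A raises IndexError)
def pyMin : List Int → Int
  | [] => 0
  | x :: r => r.foldl (fun m v => if v < m then v else m) x

-- one body of Source B's while loop on pool = p0 :: p1 :: rest:
-- seed (m1, m2) from the first two elements, scan the rest, remove both minima by value
-- (pool.remove — exact as List.erase since both values occur in the pool), append the mix
def mixOnce (p0 p1 : Int) (rest : List Int) : List Int :=
  let mm := if p0 ≤ p1 then scanTwo rest p0 p1 else scanTwo rest p1 p0
  (((p0 :: p1 :: rest).erase mm.1).erase mm.2) ++ [mm.1 + 2 * mm.2]

-- the while loop of Source B: while min(pool) < k: if len(pool) < 2: return -1; mix once.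
-- The fuel argument (initially len(pool)) only makes the recursion structural: the pool
-- shrinks by one element per iteration, so a nonempty pool never exhausts it.
def loopC : Nat → List Int → Int → Int → Int
  | 0, _, _, ans => ans   -- fuel exhausted: never reached from solution_alt on a nonempty pool
  | fuel + 1, pool, k, ans =>
    if pyMin pool < k then
      match pool with
      | [] => -1
      | [_] => -1
      | p0 :: p1 :: rest => loopC fuel (mixOnce p0 p1 rest) k (ans + 1)
    else ans

def solution_alt (scoville : List Int) (k : Int) : Int := loopC scoville.length scoville k 0

-- ===== PRECONDITION & SPEC =====
-- Pre_ excludes only the empty list, on which Python A raises an uncaught IndexError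
-- at 'scoville[0]' (B raises ValueError at 'min(pool)' there too).
def Pre_solution (scoville : List Int) (k : Int) : Prop := scoville ≠ []
instance (scoville : List Int) (k : Int) : Decidable (Pre_solution scoville k) := by
  unfold Pre_solution; infer_instance

def pvWitness_solution : List Int × Int := ([1, 2, 9], 5)

def Spec_solution (scoville : List Int) (k : Int) (out : Int) : Prop := out = solution_alt scoville k
instance (scoville : List Int) (k : Int) (out : Int) : Decidable (Spec_solution scoville k out) := by
  unfold Spec_solution; infer_instance

-- ===== CLAIM (what is proved, stated in full; the proofs are below) =====
def Claim_equal_solution : Prop := ∀ (scoville : List Int) (k : Int), Dom_solution scoville k → Pre_solution scoville k → Spec_solution scoville k (solution scoville k)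

-- ===== LEMMAS AND PROOFS =====

-- length facts about the heap primitives
theorem length_sdLoop (h : List Int) (s pos : Nat) (x : Int) :
    (sdLoop h s pos x).length = h.length := by
  fun_induction sdLoop h s pos x <;> simp_all

theorem length_suLoop (h : List Int) (s pos : Nat) (x : Int) :
    (suLoop h s pos x).length = h.length := by
  fun_induction suLoop h s pos x <;> simp_all [length_sdLoop]

theorem length_heappop_snd (h : List Int) : (heappop h).2.length = h.length - 1 := by
  simp only [heappop, siftup]
  split <;> simp [length_suLoop]

theorem length_heappush (h : List Int) (v : Int) :
    (heappush h v).length = h.length + 1 := by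
  simp [heappush, length_sdLoop]

-- membership of subtree rooted at s, by iterated parent
def inTree (s j : Nat) : Bool :=
  if j < s then false
  else if j = s then true
  else inTree s ((j - 1) / 2)
  termination_by j
  decreasing_by omega

def IsHeap (h : List Int) : Prop :=
  ∀ j, 0 < j → j < h.length → h.getD ((j - 1) / 2) 0 ≤ h.getD j 0

theorem inTree_self (s : Nat) : inTree s s = true := by
  unfold inTree; simp

theorem inTree_le {s j : Nat} (h : inTree s j = true) : s ≤ j := by
  unfold inTree at h
  split at h
  · exact absurd h (by simp)
  · omega

theorem inTree_parent {s j : Nat} (hne : j ≠ s) (h : inTree s j = true) :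
    inTree s ((j - 1) / 2) = true := by
  have hle := inTree_le h
  unfold inTree at h
  rw [if_neg (by omega), if_neg hne] at h
  exact h

theorem inTree_child {s p j : Nat} (hp : inTree s p = true) (hj : s < j)
    (hpar : (j - 1) / 2 = p) : inTree s j = true := by
  unfold inTree
  rw [if_neg (by omega), if_neg (by omega), hpar]
  exact hp

theorem inTree_zero (j : Nat) : inTree 0 j = true := by
  induction j using Nat.strong_induction_on with
  | _ j ih =>
    unfold inTree
    rcases Nat.eq_zero_or_pos j with h | h
    · simp [h]
    · rw [if_neg (by omega), if_neg (by omega)]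
      exact ih _ (by omega)

theorem getD_set_self (l : List Int) (i : Nat) (a : Int) (h : i < l.length) :
    (l.set i a).getD i 0 = a := by
  rw [List.getD_eq_getElem _ _ (by simpa using h)]
  simp [List.getElem_set_self]

theorem getD_set_ne (l : List Int) (i j : Nat) (a : Int) (h : i ≠ j) :
    (l.set i a).getD j 0 = l.getD j 0 := by
  simp [List.getD_eq_getElem?_getD, List.getElem?_set_ne h]

theorem set_getD_self (l : List Int) (i : Nat) (h : i < l.length) :
    l.set i (l.getD i 0) = l := by
  rw [List.getD_eq_getElem _ _ h, List.set_getElem_self]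

-- a :: (t with position m set to b)  ~  b :: (t with position m set to a)
theorem cons_set_perm (t : List Int) (m : Nat) (a b : Int) (hm : m < t.length) :
    List.Perm (a :: t.set m b) (b :: t.set m a) := by
  induction t generalizing m with
  | nil => simp at hm
  | cons y t ih =>
    match m with
    | 0 => exact List.Perm.swap _ _ _
    | m+1 =>
      show List.Perm (a :: y :: t.set m b) (b :: y :: t.set m a)
      exact (List.Perm.swap _ _ _).trans (((ih m (by simpa using hm)).cons y).trans
        (List.Perm.swap _ _ _))

-- swapping which of two distinct positions receives which value is a permutation
theorem set_set_perm (l : List Int) (i j : Nat) (a b : Int)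
    (hi : i < l.length) (hj : j < l.length) (hij : i ≠ j) :
    List.Perm ((l.set i a).set j b) ((l.set i b).set j a) := by
  induction l generalizing i j with
  | nil => simp at hi
  | cons c t ih =>
    match i, j with
    | 0, 0 => omega
    | 0, j+1 =>
      simpa [List.set] using cons_set_perm t j a b (by simpa using hj)
    | i+1, 0 =>
      simpa [List.set] using cons_set_perm t i b a (by simpa using hi)
    | i+1, j+1 =>
      simpa [List.set] using (ih i j (by simpa using hi) (by simpa using hj) (by omega)).cons c

theorem root_min {h : List Int} (hh : IsHeap h) :
    ∀ j, j < h.length → h.getD 0 0 ≤ h.getD j 0 := by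
  intro j
  induction j using Nat.strong_induction_on with
  | _ j ih =>
    intro hj
    rcases Nat.eq_zero_or_pos j with h0 | h0
    · subst h0; exact le_refl _
    · exact le_trans (ih ((j - 1) / 2) (by omega) (by omega)) (hh j h0 hj)

-- the central sdLoop specification (CPython _siftdown, subtree-local)
theorem sdLoop_spec (h : List Int) (s pos : Nat) (x : Int) :
    pos < h.length → inTree s pos = true →
    (∀ j, s < j → j < h.length → j ≠ pos → inTree s j = true →
      h.getD ((j - 1) / 2) 0 ≤ h.getD j 0) →
    (∀ j, j < h.length → (j - 1) / 2 = pos → 0 < j →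
      x ≤ h.getD j 0 ∧ (s < pos → h.getD ((pos - 1) / 2) 0 ≤ h.getD j 0)) →
    List.Perm (sdLoop h s pos x) (h.set pos x)
    ∧ (∀ j, s < j → j < h.length → inTree s j = true →
        (sdLoop h s pos x).getD ((j - 1) / 2) 0 ≤ (sdLoop h s pos x).getD j 0)
    ∧ (∀ j, j < h.length → inTree s j = false →
        (sdLoop h s pos x).getD j 0 = h.getD j 0) := by
  fun_induction sdLoop h s pos x with
  | case1 h pos hsp hxp ih =>
    intro hpos ht hA hB
    have hpp : (pos - 1) / 2 < pos := by omega
    have hplen : (pos - 1) / 2 < h.length := by omega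
    have htp : inTree s ((pos - 1) / 2) = true := inTree_parent (by omega) ht
    obtain ⟨ihP, ihH, ihU⟩ := ih (by simpa using hplen) htp
      (by
        intro j hj1 hj2 hj3 hj4
        simp only [List.length_set] at hj2
        by_cases hjpos : j = pos
        · subst hjpos
          rw [getD_set_ne _ _ _ _ (by omega), getD_set_self _ _ _ hpos]
        · by_cases hpj : (j - 1) / 2 = pos
          · rw [hpj, getD_set_self _ _ _ hpos, getD_set_ne _ _ _ _ (by omega)]
            exact (hB j hj2 hpj (by omega)).2 hsp
          · rw [getD_set_ne _ _ _ _ (by omega), getD_set_ne _ _ _ _ (by omega)]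
            exact hA j hj1 hj2 hjpos hj4)
      (by
        intro j hj2 hpj hj0
        simp only [List.length_set] at hj2
        have hps : s ≤ (pos - 1) / 2 := inTree_le htp
        by_cases hjpos : j = pos
        · subst hjpos
          rw [getD_set_self _ _ _ hpos]
          refine ⟨le_of_lt hxp, ?_⟩
          intro hsp2
          rw [getD_set_ne _ _ _ _ (by omega)]
          exact hA _ hsp2 hplen (by omega) htp
        · rw [getD_set_ne _ _ _ _ (by omega)]
          have hjs : s < j := by omega
          have hjt : inTree s j = true := inTree_child htp hjs hpj
          have hAj := hA j hjs hj2 hjpos hjt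
          rw [hpj] at hAj
          refine ⟨le_trans (le_of_lt hxp) hAj, ?_⟩
          intro hsp2
          rw [getD_set_ne _ _ _ _ (by omega)]
          exact le_trans (hA _ hsp2 hplen (by omega) htp) hAj)
    refine ⟨?_, ?_, ?_⟩
    · have hsw := set_set_perm h pos ((pos - 1) / 2) (h.getD ((pos - 1) / 2) 0) x hpos hplen
        (by omega)
      have e1 : (h.set pos x).set ((pos - 1) / 2) (h.getD ((pos - 1) / 2) 0) = h.set pos x := by
        rw [← getD_set_ne h pos ((pos - 1) / 2) x (by omega)]
        exact set_getD_self _ _ (by simpa using hplen)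
      rw [e1] at hsw
      exact ihP.trans hsw
    · intro j hj1 hj2 hj4
      exact ihH j hj1 (by simpa using hj2) hj4
    · intro j hj2 hj4
      have hne : pos ≠ j := by
        intro hc
        rw [← hc, ht] at hj4
        exact absurd hj4 (by simp)
      rw [ihU j (by simpa using hj2) hj4, getD_set_ne _ _ _ _ hne]
  | case2 h pos hsp hxp =>
    intro hpos ht hA hB
    refine ⟨List.Perm.refl _, ?_, ?_⟩
    · intro j hj1 hj2 hj4
      by_cases hjpos : j = pos
      · subst hjpos
        rw [getD_set_ne _ _ _ _ (by omega), getD_set_self _ _ _ hpos]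
        omega
      · by_cases hpj : (j - 1) / 2 = pos
        · rw [hpj, getD_set_self _ _ _ hpos, getD_set_ne _ _ _ _ (by omega)]
          exact (hB j hj2 hpj (by omega)).1
        · rw [getD_set_ne _ _ _ _ (by omega), getD_set_ne _ _ _ _ (by omega)]
          exact hA j hj1 hj2 hjpos hj4
    · intro j hj2 hj4
      have hne : pos ≠ j := by
        intro hc
        rw [← hc, ht] at hj4
        exact absurd hj4 (by simp)
      rw [getD_set_ne _ _ _ _ hne]
  | case3 h pos hsp =>
    intro hpos ht hA hB
    have hpe : pos = s := by
      have := inTree_le ht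
      omega
    refine ⟨List.Perm.refl _, ?_, ?_⟩
    · intro j hj1 hj2 hj4
      have hjpos : j ≠ pos := by omega
      by_cases hpj : (j - 1) / 2 = pos
      · rw [hpj, getD_set_self _ _ _ hpos, getD_set_ne _ _ _ _ (by omega)]
        exact (hB j hj2 hpj (by omega)).1
      · rw [getD_set_ne _ _ _ _ (by omega), getD_set_ne _ _ _ _ (by omega)]
        exact hA j hj1 hj2 hjpos hj4
    · intro j hj2 hj4
      have hne : pos ≠ j := by
        intro hc
        rw [← hc, ht] at hj4
        exact absurd hj4 (by simp)
      rw [getD_set_ne _ _ _ _ hne]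

-- parent of the chosen child is pos
theorem suChild_par (h : List Int) (pos : Nat) : (suChild h pos - 1) / 2 = pos := by
  unfold suChild; split <;> omega

-- the chosen child is minimal among the (one or two) children of pos
theorem suChild_min (h : List Int) (pos : Nat) (hc : 2 * pos + 1 < h.length) :
    ∀ j, 0 < j → j < h.length → (j - 1) / 2 = pos → h.getD (suChild h pos) 0 ≤ h.getD j 0 := by
  intro j hj0 hj hpj
  have hj12 : j = 2 * pos + 1 ∨ j = 2 * pos + 2 := by omega
  unfold suChild
  split
  · rename_i hcond
    rcases hj12 with rfl | rfl
    · exact not_lt.mp hcond.2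
    · exact le_refl _
  · rename_i hcond
    rcases hj12 with rfl | rfl
    · exact le_refl _
    · have : h.getD (2 * pos + 1) 0 < h.getD (2 * pos + 2) 0 := by
        by_contra hn
        exact hcond ⟨by omega, hn⟩
      exact le_of_lt this

-- the suLoop specification (CPython _siftup, subtree-local)
theorem suLoop_spec (h : List Int) (s pos : Nat) (x : Int) :
    pos < h.length → inTree s pos = true →
    (∀ j, s < j → j < h.length → j ≠ pos → (j - 1) / 2 ≠ pos → inTree s j = true →
      h.getD ((j - 1) / 2) 0 ≤ h.getD j 0) →
    (s < pos → ∀ j, j < h.length → (j - 1) / 2 = pos →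
      h.getD ((pos - 1) / 2) 0 ≤ h.getD j 0) →
    List.Perm (suLoop h s pos x) (h.set pos x)
    ∧ (∀ j, s < j → j < h.length → inTree s j = true →
        (suLoop h s pos x).getD ((j - 1) / 2) 0 ≤ (suLoop h s pos x).getD j 0)
    ∧ (∀ j, j < h.length → inTree s j = false →
        (suLoop h s pos x).getD j 0 = h.getD j 0) := by
  fun_induction suLoop h s pos x with
  | case1 h pos hc ih =>
    intro hpos ht hA hC
    have hcg := suChild_gt h pos
    have hcl := suChild_lt h pos hc
    have hcp := suChild_par h pos
    have hss := inTree_le ht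
    have hct : inTree s (suChild h pos) = true := inTree_child ht (by omega) hcp
    obtain ⟨ihP, ihH, ihU⟩ := ih (by simpa using hcl) hct
      (by
        intro j hj1 hj2 hj3 hj5 hj4
        simp only [List.length_set] at hj2
        by_cases hjpos : j = pos
        · subst hjpos
          rw [getD_set_ne _ _ _ _ (by omega), getD_set_self _ _ _ hpos]
          exact hC hj1 _ hcl hcp
        · by_cases hpj : (j - 1) / 2 = pos
          · rw [hpj, getD_set_self _ _ _ hpos, getD_set_ne _ _ _ _ (by omega)]
            exact suChild_min h pos hc j (by omega) hj2 hpj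
          · rw [getD_set_ne _ _ _ _ (by omega), getD_set_ne _ _ _ _ (by omega)]
            exact hA j hj1 hj2 hjpos hpj hj4)
      (by
        intro _ j hj2 hpj
        simp only [List.length_set] at hj2
        rw [hcp, getD_set_self _ _ _ hpos, getD_set_ne _ _ _ _ (by omega)]
        have := hA j (by omega) hj2 (by omega) (by omega)
          (inTree_child hct (by omega) hpj)
        rw [hpj] at this
        exact this)
    refine ⟨?_, ?_, ?_⟩
    · have hsw := set_set_perm h pos (suChild h pos) (h.getD (suChild h pos) 0) x hpos hcl
        (by omega)
      have e1 : (h.set pos x).set (suChild h pos) (h.getD (suChild h pos) 0) = h.set pos x := by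
        rw [← getD_set_ne h pos (suChild h pos) x (by omega)]
        exact set_getD_self _ _ (by simpa using hcl)
      rw [e1] at hsw
      exact ihP.trans hsw
    · intro j hj1 hj2 hj4
      exact ihH j hj1 (by simpa using hj2) hj4
    · intro j hj2 hj4
      have hne : pos ≠ j := by
        intro hce
        rw [← hce, ht] at hj4
        exact absurd hj4 (by simp)
      rw [ihU j (by simpa using hj2) hj4, getD_set_ne _ _ _ _ hne]
  | case2 h pos hc =>
    intro hpos ht hA hC
    obtain ⟨P, H, U⟩ := sdLoop_spec (h.set pos x) s pos x (by simpa using hpos) ht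
      (by
        intro j hj1 hj2 hj3 hj4
        simp only [List.length_set] at hj2
        have hpj : (j - 1) / 2 ≠ pos := by omega
        rw [getD_set_ne _ _ _ _ (by omega), getD_set_ne _ _ _ _ (by omega)]
        exact hA j hj1 hj2 hj3 hpj hj4)
      (by
        intro j hj2 hpj hj0
        exfalso
        simp only [List.length_set] at hj2
        omega)
    have e : (h.set pos x).set pos x = h.set pos x := List.set_set ..
    rw [e] at P
    refine ⟨P, ?_, ?_⟩
    · intro j hj1 hj2 hj4
      exact H j hj1 (by simpa using hj2) hj4
    · intro j hj2 hj4
      have hne : pos ≠ j := by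
        intro hce
        rw [← hce, ht] at hj4
        exact absurd hj4 (by simp)
      rw [U j (by simpa using hj2) hj4, getD_set_ne _ _ _ _ hne]

theorem getD_dropLast (l : List Int) (j : Nat) (h : j < l.length - 1) :
    l.dropLast.getD j 0 = l.getD j 0 := by
  rw [List.getD_eq_getElem _ _ (by simpa using h), List.getD_eq_getElem _ _ (by omega)]
  exact List.getElem_dropLast ..

theorem getD_append (l : List Int) (v : Int) (j : Nat) (h : j < l.length) :
    (l ++ [v]).getD j 0 = l.getD j 0 := by
  rw [List.getD_eq_getElem _ _ (by simp; omega), List.getD_eq_getElem _ _ h]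
  exact List.getElem_append_left ..

theorem heapifyLoop_spec : ∀ (m : Nat) (h : List Int), m ≤ h.length / 2 →
    (∀ j, 0 < j → j < h.length → m ≤ (j - 1) / 2 → h.getD ((j - 1) / 2) 0 ≤ h.getD j 0) →
    List.Perm (heapifyLoop h m) h ∧ IsHeap (heapifyLoop h m) := by
  intro m
  induction m with
  | zero =>
    intro h _ hm
    exact ⟨List.Perm.refl _, fun j hj0 hj => hm j hj0 hj (Nat.zero_le _)⟩
  | succ i ih =>
    intro h hm hinv
    have hi : i < h.length := by omega
    obtain ⟨P, H, U⟩ := suLoop_spec h i i (h.getD i 0) hi (inTree_self i)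
      (by
        intro j hj1 hj2 hj3 hj5 hj4
        have hple := inTree_le (inTree_parent hj3 hj4)
        exact hinv j (by omega) hj2 (by omega))
      (by intro hlt; exact absurd hlt (lt_irrefl i))
    have hsid : h.set i (h.getD i 0) = h := set_getD_self h i hi
    rw [hsid] at P
    have hlen : (siftup h i).length = h.length := P.length_eq
    obtain ⟨P2, H2⟩ := ih (siftup h i) (by omega)
      (by
        intro j hj0 hj2 hpj
        rw [hlen] at hj2
        simp only [siftup]
        by_cases hjt : inTree i j = true
        · have hle := inTree_le hjt
          have hji : j ≠ i := by
            intro e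
            subst e
            omega
          exact H j (by omega) hj2 hjt
        · have hjt' : inTree i j = false := by simpa using hjt
          have hpt : inTree i ((j - 1) / 2) = false := by
            rcases Bool.eq_false_or_eq_true (inTree i ((j - 1) / 2)) with hp | hp
            · exact absurd (inTree_child hp (by have := inTree_le hp; omega) rfl) (by simp [hjt'])
            · exact hp
          have hpi : (j - 1) / 2 ≠ i := by
            intro e
            rw [e, inTree_self i] at hpt
            exact absurd hpt (by simp)
          rw [U j hj2 hjt', U ((j - 1) / 2) (by omega) hpt]
          exact hinv j hj0 hj2 (by omega))
    show List.Perm (heapifyLoop (siftup h i) i) h ∧ IsHeap (heapifyLoop (siftup h i) i)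
    exact ⟨P2.trans P, H2⟩

theorem heapify_spec (h : List Int) :
    List.Perm (heapify h) h ∧ IsHeap (heapify h) := by
  unfold heapify
  exact heapifyLoop_spec (h.length / 2) h le_rfl (by intro j hj0 hj2 hj; omega)

theorem heappop_spec {h : List Int} (hne : h ≠ []) (hh : IsHeap h) :
    (heappop h).1 = h.getD 0 0
    ∧ List.Perm h ((heappop h).1 :: (heappop h).2)
    ∧ IsHeap (heappop h).2 := by
  have hl : 0 < h.length := List.length_pos_iff.mpr hne
  by_cases h1 : h.dropLast.isEmpty
  · have hl1 : h.length = 1 := by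
      have h2 : h.dropLast.length = h.length - 1 := List.length_dropLast
      have h0 : h.dropLast = [] := List.isEmpty_iff.mp h1
      rw [h0] at h2
      simp at h2
      omega
    obtain ⟨a, rfl⟩ := List.length_eq_one_iff.mp hl1
    refine ⟨rfl, by simp [heappop], ?_⟩
    intro j hj0 hjl
    simp [heappop] at hjl
  · have hl2 : 2 ≤ h.length := by
      have h2 : h.dropLast.length = h.length - 1 := List.length_dropLast
      have h0 : h.dropLast ≠ [] := by simpa [List.isEmpty_iff] using h1
      have h0' : h.dropLast.length ≠ 0 := fun hc => h0 (List.length_eq_zero_iff.mp hc)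
      omega
    have hpop : heappop h =
        (h.dropLast.getD 0 0, siftup (h.dropLast.set 0 (h.getD (h.length - 1) 0)) 0) := by
      simp only [heappop, h1]
      simp
    obtain ⟨c, t, hct⟩ : ∃ c t, h.dropLast = c :: t := by
      cases hd : h.dropLast with
      | nil => exact absurd (by simp [hd]) h1
      | cons c t => exact ⟨c, t, rfl⟩
    have hc0 : h.dropLast.getD 0 0 = c := by rw [hct]; rfl
    have hdl : h.dropLast.length = h.length - 1 := List.length_dropLast
    have h2eq : h.dropLast.set 0 (h.getD (h.length - 1) 0) =
        h.getD (h.length - 1) 0 :: t := by rw [hct]; rfl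
    have hlen2 : (h.getD (h.length - 1) 0 :: t).length = h.length - 1 := by
      rw [← h2eq]
      simp [hdl]
    obtain ⟨P, H, U⟩ := suLoop_spec (h.getD (h.length - 1) 0 :: t) 0 0
      ((h.getD (h.length - 1) 0 :: t).getD 0 0) (by simp) (inTree_self 0)
      (by
        intro j hj1 hj2 hj3 hj5 hj4
        have hv1 : (h.getD (h.length - 1) 0 :: t).getD j 0 = h.getD j 0 := by
          rw [← h2eq, getD_set_ne _ _ _ _ (by omega)]
          exact getD_dropLast h j (by omega)
        have hv2 : (h.getD (h.length - 1) 0 :: t).getD ((j - 1) / 2) 0 =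
            h.getD ((j - 1) / 2) 0 := by
          rw [← h2eq, getD_set_ne _ _ _ _ (by omega)]
          exact getD_dropLast h ((j - 1) / 2) (by omega)
        rw [hv1, hv2]
        exact hh j (by omega) (by omega))
      (by intro hlt; exact absurd hlt (lt_irrefl 0))
    have hsift : siftup (h.dropLast.set 0 (h.getD (h.length - 1) 0)) 0 =
        suLoop (h.getD (h.length - 1) 0 :: t) 0 0
          ((h.getD (h.length - 1) 0 :: t).getD 0 0) := by
      rw [siftup, h2eq]
    have e : (h.getD (h.length - 1) 0 :: t).set 0
        ((h.getD (h.length - 1) 0 :: t).getD 0 0) = h.getD (h.length - 1) 0 :: t :=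
      set_getD_self _ _ (by simp)
    rw [e] at P
    have hsnd : List.Perm (siftup (h.dropLast.set 0 (h.getD (h.length - 1) 0)) 0)
        (h.getD (h.length - 1) 0 :: t) := by
      rw [hsift]
      exact P
    have hsplit : h.dropLast ++ [h.getD (h.length - 1) 0] = h := by
      have hg : h.getD (h.length - 1) 0 = h.getLast hne := by
        rw [List.getLast_eq_getElem, List.getD_eq_getElem _ _ (by omega)]
      rw [hg]
      exact List.dropLast_append_getLast hne
    refine ⟨?_, ?_, ?_⟩
    · rw [hpop]
      exact getD_dropLast h 0 (by omega)
    · rw [hpop]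
      have s1 : List.Perm h ((c :: t) ++ [h.getD (h.length - 1) 0]) := by
        rw [← hct, hsplit]
      have s2 : List.Perm ((c :: t) ++ [h.getD (h.length - 1) 0])
          (c :: (h.getD (h.length - 1) 0 :: t)) := by
        have := List.perm_append_singleton (h.getD (h.length - 1) 0) t
        exact this.cons c
      refine (s1.trans s2).trans ?_
      rw [hc0]
      exact (hsnd.symm).cons c
    · rw [hpop]
      intro j hj0 hjl
      have hjl2 : j < (h.getD (h.length - 1) 0 :: t).length := by
        rw [← hsnd.length_eq]
        simpa using hjl
      have hgj := H j hj0 hjl2 (inTree_zero j)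
      rw [hsift]
      exact hgj

theorem heappush_spec {h : List Int} (hh : IsHeap h) (v : Int) :
    List.Perm (heappush h v) (v :: h) ∧ IsHeap (heappush h v) := by
  obtain ⟨P, H, U⟩ := sdLoop_spec (h ++ [v]) 0 h.length v (by simp) (inTree_zero _)
    (by
      intro j hj1 hj2 hj3 hj4
      simp only [List.length_append, List.length_cons, List.length_nil] at hj2
      rw [getD_append _ _ _ (by omega), getD_append _ _ _ (by omega)]
      exact hh j (by omega) (by omega))
    (by
      intro j hj2 hpj hj0
      exfalso
      simp only [List.length_append, List.length_cons, List.length_nil] at hj2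
      omega)
  have hv : (h ++ [v]).getD h.length 0 = v := by
    rw [List.getD_eq_getElem _ _ (by simp)]
    simp
  have e : (h ++ [v]).set h.length v = h ++ [v] := by
    have hlt : h.length < (h ++ [v]).length := by simp
    have := set_getD_self (h ++ [v]) h.length hlt
    rw [hv] at this
    exact this
  rw [e] at P
  constructor
  · exact P.trans (List.perm_append_singleton v h)
  · intro j hj0 hjl
    rw [length_heappush] at hjl
    exact H j hj0 (by simp only [List.length_append, List.length_cons, List.length_nil]; omega)
      (inTree_zero j)

-- proof-side reference loop over a SORTED list (the bridge between the heap and the scan)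
def insort : List Int → Int → List Int
  | [], x => [x]
  | y :: t, x => if x < y then x :: y :: t else y :: insort t x

theorem length_insort (t : List Int) (x : Int) : (insort t x).length = t.length + 1 := by
  induction t with
  | nil => rfl
  | cons y t ih => simp only [insort]; split <;> simp [ih]

def loopB (s : List Int) (k : Int) (ans : Int) : Int :=
  match s with
  | [] => ans
  | a :: t =>
    if a < k then
      match t with
      | [] => -1
      | b :: t' => loopB (insort t' (a + 2 * b)) k (ans + 1)
    else ans
  termination_by s.length
  decreasing_by simp [length_insort]

theorem insort_perm (t : List Int) (x : Int) : List.Perm (insort t x) (x :: t) := by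
  induction t with
  | nil => rfl
  | cons y t ih =>
    simp only [insort]
    split
    · rfl
    · exact ((ih.cons y).trans (List.Perm.swap x y t)).symm.symm

theorem insort_pairwise {t : List Int} (hs : t.Pairwise (· ≤ ·)) (x : Int) :
    (insort t x).Pairwise (· ≤ ·) := by
  induction t with
  | nil => simp [insort]
  | cons y t ih =>
    obtain ⟨hy, ht⟩ := List.pairwise_cons.mp hs
    simp only [insort]
    split
    · rename_i hxy
      exact List.pairwise_cons.mpr ⟨by
        intro z hz
        rcases List.mem_cons.mp hz with rfl | hz
        · exact le_of_lt hxy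
        · exact le_trans (le_of_lt hxy) (hy z hz), hs⟩
    · rename_i hxy
      refine List.pairwise_cons.mpr ⟨?_, ih ht⟩
      intro z hz
      have : z ∈ x :: t := (insort_perm t x).mem_iff.mp hz
      rcases List.mem_cons.mp this with rfl | hz'
      · omega
      · exact hy z hz'

theorem heap_head_eq {h : List Int} (hh : IsHeap h) {a : Int} {t : List Int}
    (hp : List.Perm h (a :: t)) (hs : (a :: t).Pairwise (· ≤ ·)) :
    h.getD 0 0 = a := by
  have hlen : 0 < h.length := by
    rw [hp.length_eq]; simp
  have ha : a ∈ h := hp.mem_iff.mpr (List.mem_cons_self ..)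
  obtain ⟨i, hi, hia⟩ := List.mem_iff_getElem.mp ha
  have h1 : h.getD 0 0 ≤ a := by
    rw [← hia, ← List.getD_eq_getElem h 0 hi]
    exact root_min hh i hi
  have h2 : a ≤ h.getD 0 0 := by
    have hm : h.getD 0 0 ∈ h := by
      rw [List.getD_eq_getElem h 0 hlen]
      exact List.getElem_mem hlen
    rcases List.mem_cons.mp (hp.mem_iff.mp hm) with he | hm'
    · omega
    · exact (List.pairwise_cons.mp hs).1 _ hm'
  omega

theorem loopB_cons_nil (a : Int) (k ans : Int) :
    loopB [a] k ans = if a < k then -1 else ans := by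
  simp only [loopB]

theorem loopB_cons_cons (a b : Int) (t' : List Int) (k ans : Int) :
    loopB (a :: b :: t') k ans =
      if a < k then loopB (insort t' (a + 2 * b)) k (ans + 1) else ans := by
  simp only [loopB]

-- A's heap loop computes the sorted-list reference loop
theorem loop_eq (n : Nat) : ∀ (h sl : List Int) (k ans : Int), h.length ≤ n → h ≠ [] →
    IsHeap h → sl.Pairwise (· ≤ ·) → List.Perm h sl → loopA n h k ans = loopB sl k ans := by
  induction n with
  | zero =>
    intro h sl k ans hn hne _ _ _
    exact absurd (List.length_eq_zero_iff.mp (Nat.le_zero.mp hn)) hne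
  | succ n ih =>
    intro h sl k ans hn hne hh hsw hp
    obtain ⟨a, t, rfl⟩ : ∃ a t, sl = a :: t := by
      cases sl with
      | nil => exact absurd hp.eq_nil hne
      | cons a t => exact ⟨a, t, rfl⟩
    have hhead : h.getD 0 0 = a := heap_head_eq hh hp hsw
    obtain ⟨hf1, hpp1, hhp1⟩ := heappop_spec hne hh
    have hfst : (heappop h).1 = a := hf1.trans hhead
    have hp2 : List.Perm (heappop h).2 t := by
      have := (hpp1.symm.trans hp)
      rw [hfst] at this
      exact this.cons_inv
    show (if h.getD 0 0 < k then
        if (heappop h).2.isEmpty then (-1 : Int)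
        else loopA n (heappush (heappop (heappop h).2).2
          ((heappop h).1 + 2 * (heappop (heappop h).2).1)) k (ans + 1)
      else ans) = loopB (a :: t) k ans
    rw [hhead]
    by_cases hak : a < k
    · rw [if_pos hak]
      by_cases hemp : (heappop h).2.isEmpty
      · have hsnd : (heappop h).2 = [] := List.isEmpty_iff.mp hemp
        have ht : t = [] := by
          rw [hsnd] at hp2
          exact hp2.nil_eq.symm
        rw [if_pos hemp, ht, loopB_cons_nil, if_pos hak]
      · rw [if_neg hemp]
        have hsnd_ne : (heappop h).2 ≠ [] := by simpa [List.isEmpty_iff] using hemp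
        obtain ⟨b, t', rfl⟩ : ∃ b t', t = b :: t' := by
          cases t with
          | nil => exact absurd hp2.eq_nil hsnd_ne
          | cons b t' => exact ⟨b, t', rfl⟩
        obtain ⟨hf2, hpp2, hhp2⟩ := heappop_spec hsnd_ne hhp1
        have hswt : (b :: t').Pairwise (· ≤ ·) := (List.pairwise_cons.mp hsw).2
        have hfst2 : (heappop (heappop h).2).1 = b :=
          hf2.trans (heap_head_eq hhp1 hp2 hswt)
        have hp3 : List.Perm (heappop (heappop h).2).2 t' := by
          have := (hpp2.symm.trans hp2)
          rw [hfst2] at this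
          exact this.cons_inv
        obtain ⟨hpu, hhu⟩ := heappush_spec hhp2 ((heappop h).1 + 2 * (heappop (heappop h).2).1)
        have hlh : 2 ≤ h.length := by
          have e1 := length_heappop_snd h
          have e2 : (heappop h).2.length ≠ 0 := fun hc => hsnd_ne (List.length_eq_zero_iff.mp hc)
          omega
        have hlen3 : (heappush (heappop (heappop h).2).2
            ((heappop h).1 + 2 * (heappop (heappop h).2).1)).length = h.length - 1 := by
          rw [length_heappush, length_heappop_snd, length_heappop_snd]
          omega
        have hcall := ih (heappush (heappop (heappop h).2).2
            ((heappop h).1 + 2 * (heappop (heappop h).2).1))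
          (insort t' ((heappop h).1 + 2 * (heappop (heappop h).2).1)) k (ans + 1)
          (by omega)
          (by
            intro hc
            have := congrArg List.length hc
            rw [hlen3] at this
            simp at this
            omega)
          hhu
          (by
            rw [hfst, hfst2]
            exact insort_pairwise (List.pairwise_cons.mp hswt).2 _)
          (hpu.trans ((hp3.cons _).trans (insort_perm t' _).symm))
        rw [hcall, hfst, hfst2, loopB_cons_cons, if_pos hak]
    · rw [if_neg hak]
      cases t with
      | nil => rw [loopB_cons_nil, if_neg hak]
      | cons b t' => rw [loopB_cons_cons, if_neg hak]

-- multiset preservation of the scan (used by length_mixOnce)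
theorem scanTwo_elems : ∀ (r : List Int) (x y : Int), ∃ m : Multiset Int,
    (x ::ₘ y ::ₘ (r : Multiset Int)) = (scanTwo r x y).1 ::ₘ (scanTwo r x y).2 ::ₘ m := by
  intro r
  induction r with
  | nil => intro x y; exact ⟨0, rfl⟩
  | cons v r ih =>
    intro x y
    simp only [scanTwo]
    split
    · obtain ⟨m, hm⟩ := ih v x
      refine ⟨y ::ₘ m, ?_⟩
      calc (x ::ₘ y ::ₘ ((v :: r : List Int) : Multiset Int))
          = y ::ₘ v ::ₘ x ::ₘ (r : Multiset Int) := by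
            show (x ::ₘ y ::ₘ v ::ₘ (r : Multiset Int)) = y ::ₘ v ::ₘ x ::ₘ (r : Multiset Int)
            rw [Multiset.cons_swap x y, Multiset.cons_swap x v]
        _ = y ::ₘ (scanTwo r v x).1 ::ₘ (scanTwo r v x).2 ::ₘ m := by rw [hm]
        _ = _ := by rw [Multiset.cons_swap, Multiset.cons_swap (scanTwo r v x).2]
    · split
      · obtain ⟨m, hm⟩ := ih x v
        refine ⟨y ::ₘ m, ?_⟩
        calc (x ::ₘ y ::ₘ ((v :: r : List Int) : Multiset Int))
            = y ::ₘ x ::ₘ v ::ₘ (r : Multiset Int) := by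
              show (x ::ₘ y ::ₘ v ::ₘ (r : Multiset Int)) = y ::ₘ x ::ₘ v ::ₘ (r : Multiset Int)
              rw [Multiset.cons_swap x y]
          _ = y ::ₘ (scanTwo r x v).1 ::ₘ (scanTwo r x v).2 ::ₘ m := by rw [hm]
          _ = _ := by rw [Multiset.cons_swap, Multiset.cons_swap (scanTwo r x v).2]
      · obtain ⟨m, hm⟩ := ih x y
        refine ⟨v ::ₘ m, ?_⟩
        calc (x ::ₘ y ::ₘ ((v :: r : List Int) : Multiset Int))
            = v ::ₘ x ::ₘ y ::ₘ (r : Multiset Int) := by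
              show (x ::ₘ y ::ₘ v ::ₘ (r : Multiset Int)) = v ::ₘ x ::ₘ y ::ₘ (r : Multiset Int)
              rw [Multiset.cons_swap y v, Multiset.cons_swap x v]
          _ = v ::ₘ (scanTwo r x y).1 ::ₘ (scanTwo r x y).2 ::ₘ m := by rw [hm]
          _ = _ := by rw [Multiset.cons_swap, Multiset.cons_swap (scanTwo r x y).2]

theorem length_mixOnce (p0 p1 : Int) (rest : List Int) :
    (mixOnce p0 p1 rest).length = rest.length + 1 := by
  unfold mixOnce
  have key : ∀ x y : Int, (x ::ₘ y ::ₘ (rest : Multiset Int)) =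
      ((p0 :: p1 :: rest : List Int) : Multiset Int) →
      ∀ mm : Int × Int, mm = scanTwo rest x y →
      ((((p0 :: p1 :: rest).erase mm.1).erase mm.2) ++ [mm.1 + 2 * mm.2]).length
        = rest.length + 1 := by
    intro x y hxy mm hmm
    obtain ⟨m, hm⟩ := scanTwo_elems rest x y
    rw [hxy] at hm
    have h1 : mm.1 ∈ (p0 :: p1 :: rest : List Int) := by
      rw [← Multiset.mem_coe, hm, hmm]
      exact Multiset.mem_cons_self _ _
    have h2 : mm.2 ∈ (p0 :: p1 :: rest : List Int).erase mm.1 := by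
      rw [← Multiset.mem_coe, ← Multiset.coe_erase, hm, hmm, Multiset.erase_cons_head]
      exact Multiset.mem_cons_self _ _
    rw [List.length_append, List.length_erase_of_mem h2, List.length_erase_of_mem h1]
    simp
  split
  · exact key p0 p1 (by simp [Multiset.cons_coe]) _ rfl
  · exact key p1 p0 (by rw [Multiset.cons_swap]; simp [Multiset.cons_coe]) _ rfl

-- ordered scan specification: (m1, m2) are the two smallest, m2 bounds the rest
theorem scanTwo_spec : ∀ (r : List Int) (x y : Int), x ≤ y →
    (scanTwo r x y).1 ≤ (scanTwo r x y).2 ∧ (scanTwo r x y).1 ≤ x ∧ (scanTwo r x y).2 ≤ y ∧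
    ∃ m : Multiset Int, (x ::ₘ y ::ₘ (r : Multiset Int)) =
      (scanTwo r x y).1 ::ₘ (scanTwo r x y).2 ::ₘ m ∧ ∀ z ∈ m, (scanTwo r x y).2 ≤ z := by
  intro r
  induction r with
  | nil =>
    intro x y hxy
    exact ⟨hxy, le_refl x, le_refl y, 0, rfl, by simp⟩
  | cons v r ih =>
    intro x y hxy
    simp only [scanTwo]
    split
    · rename_i hvx
      obtain ⟨h12, h1x, h2y, m, hm, hall⟩ := ih v x (le_of_lt hvx)
      refine ⟨h12, by omega, by omega, y ::ₘ m, ?_, ?_⟩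
      · calc (x ::ₘ y ::ₘ ((v :: r : List Int) : Multiset Int))
            = y ::ₘ v ::ₘ x ::ₘ (r : Multiset Int) := by
              show (x ::ₘ y ::ₘ v ::ₘ (r : Multiset Int)) = y ::ₘ v ::ₘ x ::ₘ (r : Multiset Int)
              rw [Multiset.cons_swap x y, Multiset.cons_swap x v]
          _ = y ::ₘ (scanTwo r v x).1 ::ₘ (scanTwo r v x).2 ::ₘ m := by rw [hm]
          _ = _ := by rw [Multiset.cons_swap, Multiset.cons_swap (scanTwo r v x).2]
      · intro z hz
        rcases Multiset.mem_cons.mp hz with rfl | hz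
        · omega
        · exact hall z hz
    · split
      · rename_i hvx hvy
        obtain ⟨h12, h1x, h2y, m, hm, hall⟩ := ih x v (by omega)
        refine ⟨h12, h1x, by omega, y ::ₘ m, ?_, ?_⟩
        · calc (x ::ₘ y ::ₘ ((v :: r : List Int) : Multiset Int))
              = y ::ₘ x ::ₘ v ::ₘ (r : Multiset Int) := by
                show (x ::ₘ y ::ₘ v ::ₘ (r : Multiset Int)) = y ::ₘ x ::ₘ v ::ₘ (r : Multiset Int)
                rw [Multiset.cons_swap x y]
            _ = y ::ₘ (scanTwo r x v).1 ::ₘ (scanTwo r x v).2 ::ₘ m := by rw [hm]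
            _ = _ := by rw [Multiset.cons_swap, Multiset.cons_swap (scanTwo r x v).2]
        · intro z hz
          rcases Multiset.mem_cons.mp hz with rfl | hz
          · omega
          · exact hall z hz
      · rename_i hvx hvy
        obtain ⟨h12, h1x, h2y, m, hm, hall⟩ := ih x y hxy
        refine ⟨h12, h1x, h2y, v ::ₘ m, ?_, ?_⟩
        · calc (x ::ₘ y ::ₘ ((v :: r : List Int) : Multiset Int))
              = v ::ₘ x ::ₘ y ::ₘ (r : Multiset Int) := by
                show (x ::ₘ y ::ₘ v ::ₘ (r : Multiset Int)) = v ::ₘ x ::ₘ y ::ₘ (r : Multiset Int)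
                rw [Multiset.cons_swap y v, Multiset.cons_swap x v]
            _ = v ::ₘ (scanTwo r x y).1 ::ₘ (scanTwo r x y).2 ::ₘ m := by rw [hm]
            _ = _ := by rw [Multiset.cons_swap, Multiset.cons_swap (scanTwo r x y).2]
        · intro z hz
          rcases Multiset.mem_cons.mp hz with rfl | hz
          · omega
          · exact hall z hz

-- pyMin is a minimal member of a nonempty list
theorem pyMin_spec (x : Int) (r : List Int) :
    pyMin (x :: r) ∈ x :: r ∧ ∀ z ∈ x :: r, pyMin (x :: r) ≤ z := by
  suffices h : ∀ (r : List Int) (x : Int),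
      (r.foldl (fun m v => if v < m then v else m) x) ∈ x :: r ∧
      ∀ z ∈ x :: r, (r.foldl (fun m v => if v < m then v else m) x) ≤ z by
    exact h r x
  intro r
  induction r with
  | nil => exact fun x => ⟨by simp, by simp⟩
  | cons v r ih =>
    intro x
    simp only [List.foldl_cons]
    obtain ⟨hmem, hle⟩ := ih (if v < x then v else x)
    constructor
    · rcases List.mem_cons.mp hmem with he | hm
      · rw [he]
        split <;> simp
      · exact List.mem_cons_of_mem _ (List.mem_cons_of_mem _ hm)
    · intro z hz
      rcases List.mem_cons.mp hz with rfl | hz'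
      · exact le_trans (hle _ (List.mem_cons_self ..)) (by split <;> omega)
      · rcases List.mem_cons.mp hz' with rfl | hz'' <;>
          [exact le_trans (hle _ (List.mem_cons_self ..)) (by split <;> omega);
           exact hle _ (List.mem_cons_of_mem _ hz'')]

-- B's unordered-scan loop computes the sorted-list reference loop
theorem loopC_eq (n : Nat) : ∀ (pool s : List Int) (k ans : Int), pool.length ≤ n →
    pool ≠ [] → s.Pairwise (· ≤ ·) → List.Perm pool s → loopC n pool k ans = loopB s k ans := by
  induction n with
  | zero =>
    intro pool s k ans hn hne _ _
    exact absurd (List.length_eq_zero_iff.mp (Nat.le_zero.mp hn)) hne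
  | succ n ih =>
    intro pool s k ans hn hne hsw hp
    obtain ⟨a, t, rfl⟩ : ∃ a t, s = a :: t := by
      cases s with
      | nil => exact absurd hp.eq_nil hne
      | cons a t => exact ⟨a, t, rfl⟩
    obtain ⟨p0, pr, rfl⟩ : ∃ p0 pr, pool = p0 :: pr := by
      cases pool with
      | nil => exact absurd rfl hne
      | cons p0 pr => exact ⟨p0, pr, rfl⟩
    -- pyMin pool = a
    obtain ⟨hmm, hml⟩ := pyMin_spec p0 pr
    have hamem : a ∈ p0 :: pr := hp.mem_iff.mpr (List.mem_cons_self ..)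
    have hals : ∀ z ∈ a :: t, a ≤ z := by
      intro z hz
      rcases List.mem_cons.mp hz with rfl | hz'
      · exact le_refl _
      · exact (List.pairwise_cons.mp hsw).1 z hz'
    have hmin_a : pyMin (p0 :: pr) = a :=
      le_antisymm (hml a hamem) (hals _ (hp.mem_iff.mp hmm))
    show (if pyMin (p0 :: pr) < k then
        match p0 :: pr with
        | [] => (-1 : Int)
        | [_] => -1
        | p0 :: p1 :: rest => loopC n (mixOnce p0 p1 rest) k (ans + 1)
      else ans) = loopB (a :: t) k ans
    rw [hmin_a]
    by_cases hak : a < k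
    · rw [if_pos hak]
      cases pr with
      | nil =>
        have ht : t = [] := by
          have := hp.length_eq
          simp only [List.length_cons, List.length_nil] at this
          exact List.length_eq_zero_iff.mp (by omega)
        rw [ht, loopB_cons_nil, if_pos hak]
      | cons p1 rest =>
        obtain ⟨b, t', rfl⟩ : ∃ b t', t = b :: t' := by
          cases t with
          | nil => simpa using hp.length_eq
          | cons b t' => exact ⟨b, t', rfl⟩
        -- the scan finds exactly (a, b)
        have hMpool : ∀ (x y : Int), (hxy : x ≤ y) →
            (x ::ₘ y ::ₘ (rest : Multiset Int)) =
              ((p0 :: p1 :: rest : List Int) : Multiset Int) →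
            ∀ mm : Int × Int, mm = scanTwo rest x y →
            mm.1 = a ∧ mm.2 = b := by
          intro x y hxy hxyM mm hmmdef
          obtain ⟨h12, h1x, h2y, m, hm, hall⟩ := scanTwo_spec rest x y hxy
          rw [← hmmdef] at h12 h1x h2y hm hall
          rw [hxyM] at hm
          have hMs : ((p0 :: p1 :: rest : List Int) : Multiset Int) =
              ((a :: b :: t' : List Int) : Multiset Int) := Multiset.coe_eq_coe.mpr hp
          have hswt : ∀ z ∈ b :: t', b ≤ z := by
            intro z hz
            rcases List.mem_cons.mp hz with rfl | hz'
            · exact le_refl _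
            · exact (List.pairwise_cons.mp (List.pairwise_cons.mp hsw).2).1 z hz'
          have h1a : mm.1 = a := by
            have hmem_a : a ∈ mm.1 ::ₘ mm.2 ::ₘ m := by
              rw [← hm, hMs]
              simp
            have hle1 : mm.1 ≤ a := by
              rcases Multiset.mem_cons.mp hmem_a with he | hmem_a'
              · omega
              · rcases Multiset.mem_cons.mp hmem_a' with he | hmem_a'' <;>
                  [omega; exact le_trans h12 (hall _ hmem_a'')]
            have hmem1 : mm.1 ∈ (a :: b :: t' : List Int) := by
              rw [← Multiset.mem_coe, ← hMs, hm]
              exact Multiset.mem_cons_self _ _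
            exact le_antisymm hle1 (hals _ hmem1)
          refine ⟨h1a, ?_⟩
          -- erase a from both decompositions
          have hN : mm.2 ::ₘ m = b ::ₘ (t' : Multiset Int) := by
            have e1 : (mm.1 ::ₘ mm.2 ::ₘ m).erase a = mm.2 ::ₘ m := by
              rw [← h1a, Multiset.erase_cons_head]
            have e2 : (((a :: b :: t' : List Int) : Multiset Int)).erase a =
                b ::ₘ (t' : Multiset Int) := by
              rw [← Multiset.cons_coe a (b :: t'), ← Multiset.cons_coe b t',
                Multiset.erase_cons_head]
            rw [← e1, ← hm, hMs, e2]
          have hmem_b : b ∈ mm.2 ::ₘ m := by rw [hN]; exact Multiset.mem_cons_self _ _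
          have hle2 : mm.2 ≤ b := by
            rcases Multiset.mem_cons.mp hmem_b with he | hb'
            · omega
            · exact hall _ hb'
          have hmem2 : mm.2 ∈ b :: t' := by
            rw [← Multiset.mem_coe, ← Multiset.cons_coe b t', ← hN]
            exact Multiset.mem_cons_self _ _
          exact le_antisymm hle2 (hswt _ hmem2)
        have hmix : List.Perm (mixOnce p0 p1 rest) (insort t' (a + 2 * b)) ∧
            (mixOnce p0 p1 rest).length = rest.length + 1 := by
          refine ⟨?_, length_mixOnce p0 p1 rest⟩
          unfold mixOnce
          have hgoal : ∀ mm : Int × Int, mm.1 = a → mm.2 = b →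
              List.Perm ((((p0 :: p1 :: rest).erase mm.1).erase mm.2) ++ [mm.1 + 2 * mm.2])
                (insort t' (a + 2 * b)) := by
            intro mm h1 h2
            rw [h1, h2]
            have hperm2 : List.Perm (((p0 :: p1 :: rest).erase a).erase b) t' := by
              have := (hp.erase a).erase b
              simpa using this
            exact (hperm2.append_right _).trans
              ((List.perm_append_singleton _ _).trans (insort_perm t' _).symm)
          split
          · rename_i hle
            obtain ⟨h1, h2⟩ := hMpool p0 p1 hle (by simp [Multiset.cons_coe]) _ rfl
            exact hgoal _ h1 h2
          · rename_i hgt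
            obtain ⟨h1, h2⟩ := hMpool p1 p0 (by omega)
              (by rw [Multiset.cons_swap]; simp [Multiset.cons_coe]) _ rfl
            exact hgoal _ h1 h2
        obtain ⟨hmixp, hmixl⟩ := hmix
        have hlen : (p0 :: p1 :: rest).length = rest.length + 2 := by simp
        have hcall := ih (mixOnce p0 p1 rest) (insort t' (a + 2 * b)) k (ans + 1)
          (by rw [hmixl]; simp at hn; omega)
          (by
            intro hc
            have := congrArg List.length hc
            rw [hmixl] at this
            simp at this)
          (insort_pairwise (List.pairwise_cons.mp (List.pairwise_cons.mp hsw).2).2 _)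
          hmixp
        show loopC n (mixOnce p0 p1 rest) k (ans + 1) = loopB (a :: b :: t') k ans
        rw [hcall, loopB_cons_cons, if_pos hak]
    · rw [if_neg hak]
      cases t with
      | nil => rw [loopB_cons_nil, if_neg hak]
      | cons b t' => rw [loopB_cons_cons, if_neg hak]

-- ===== VERDICT (by name: the statement is the Claim_ definition above) =====
theorem solution_spec : Claim_equal_solution := by
  intro scoville k _ hpre
  unfold Spec_solution solution solution_alt
  obtain ⟨hperm, hheap⟩ := heapify_spec scoville
  have hsp := PySem.List.sorted_perm scoville (fun x => x) false
  have hspw : (PySem.List.sorted scoville (fun x => x) false).Pairwise (· ≤ ·) := by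
    simpa using PySem.List.sorted_pairwise scoville (fun x => x)
  have hne : heapify scoville ≠ [] := by
    intro hc
    apply hpre
    have hl := hperm.length_eq
    rw [hc] at hl
    exact List.length_eq_zero_iff.mp hl.symm
  have hA := loop_eq (heapify scoville).length (heapify scoville) _ k 0 le_rfl hne hheap hspw
    (hperm.trans hsp.symm)
  -- (solution unfolds to loopA (heapify scoville).length (heapify scoville) k 0)
  have hB := loopC_eq scoville.length scoville (PySem.List.sorted scoville (fun x => x) false)
    k 0 le_rfl hpre hspw hsp.symm
  rw [hA, hB]
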